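-- pv_equiv track=rewrite | github.com/Holedozer1229/Excalibur-EXS | pkg/prophecy/rune_validation.py | _count_leading_zero_bytes
-- ===== SOURCE A (Python) =====
-- def _count_leading_zero_bytes(hex_string: str) -> int:
--     """Count leading zero bytes in hex string (2 chars per byte)."""
--     count = 0
--     for i in range(0, len(hex_string), 2):
--         if hex_string[i:i+2] == '00':
--             count += 1
--         else:
--             break
--     return count
-- ===== SOURCE B (Python) =====
-- def _count_leading_zero_bytes(hex_string: str) -> int:
--     """Count leading zero bytes in hex string (2 chars per byte)."""
--     return (len(hex_string) - len(hex_string.lstrip('0'))) // 2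
-- ===== Notes on version B (the rewrite author's own statement) =====
-- stated objective: simpler
-- what changed: Replaces the explicit loop over aligned 2-char slices (with break) by a closed-form expression: the length of the leading run of zero characters (via lstrip) floor-divided by 2.
import Mathlib
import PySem

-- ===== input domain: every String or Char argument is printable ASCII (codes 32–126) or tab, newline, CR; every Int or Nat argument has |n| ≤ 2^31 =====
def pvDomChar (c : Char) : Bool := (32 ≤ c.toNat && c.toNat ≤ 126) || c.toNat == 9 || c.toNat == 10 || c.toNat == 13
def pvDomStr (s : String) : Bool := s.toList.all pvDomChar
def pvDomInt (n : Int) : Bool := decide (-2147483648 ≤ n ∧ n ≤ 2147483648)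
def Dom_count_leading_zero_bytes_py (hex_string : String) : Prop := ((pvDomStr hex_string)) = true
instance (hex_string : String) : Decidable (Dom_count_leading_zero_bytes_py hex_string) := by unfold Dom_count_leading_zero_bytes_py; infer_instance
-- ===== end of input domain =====

-- B replaces A's aligned 2-char-slice loop with a closed form: length of the
-- leading '0'-run (lstrip) floor-divided by 2 — simpler, same O(n) cost.


-- ===== PORT A =====
-- the for-loop over range(0, len, 2) with break: at each step compare the
-- 2-char slice hex_string[i:i+2] (= take 2 of the remaining chars) with "00",
-- count and advance by 2, or break
def countLoopA (l : List Char) : Int :=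
  if l = [] then 0
  else if l.take 2 = ['0', '0'] then 1 + countLoopA (l.drop 2) else 0
termination_by l.length
decreasing_by
  rename_i h _
  have hpos : 0 < l.length := List.length_pos_iff.mpr h
  simp [List.length_drop]
  omega

def count_leading_zero_bytes_py (hex_string : String) : Int :=
  countLoopA hex_string.toList

-- ===== PORT B =====
-- hex_string.lstrip('0') ported by hand as dropWhile (· == '0') on the char
-- list (exact: lstrip with a one-char argument drops exactly that leading run);
-- '//' is PySem.Int.floordiv
def count_leading_zero_bytes_py_alt (hex_string : String) : Int :=
  PySem.Int.floordiv
    ((hex_string.toList.length : Int)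
      - ((hex_string.toList.dropWhile (fun c => c == '0')).length : Int)) 2

-- ===== PRECONDITION & SPEC =====
def Spec_count_leading_zero_bytes_py (hex_string : String) (out : Int) : Prop := out = count_leading_zero_bytes_py_alt hex_string
instance (hex_string : String) (out : Int) : Decidable (Spec_count_leading_zero_bytes_py hex_string out) := by unfold Spec_count_leading_zero_bytes_py; infer_instance

-- ===== CLAIM (what is proved, stated in full; the proofs are below) =====
def Claim_equal_count_leading_zero_bytes_py : Prop := ∀ (hex_string : String), Dom_count_leading_zero_bytes_py hex_string → Spec_count_leading_zero_bytes_py hex_string (count_leading_zero_bytes_py hex_string)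

-- ===== LEMMAS AND PROOFS =====

-- A's loop counts exactly ⌊(length of leading '0'-run)/2⌋
theorem countLoopA_eq_takeWhile (n : Nat) (l : List Char) (hn : l.length ≤ n) :
    countLoopA l = (((l.takeWhile (fun c => c == '0')).length / 2 : Nat) : Int) := by
  induction n generalizing l with
  | zero =>
    have : l = [] := List.eq_nil_of_length_eq_zero (Nat.le_zero.mp hn)
    subst this
    simp [countLoopA]
  | succ n ih =>
    match l with
    | [] => simp [countLoopA]
    | [c1] =>
      rw [countLoopA]
      by_cases hc : c1 = '0'
      · simp [List.takeWhile, hc]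
      · have hb : (c1 == '0') = false := by simp [hc]
        simp [List.takeWhile, hb]
    | c1 :: c2 :: rest =>
      rw [countLoopA]
      by_cases hc1 : c1 = '0'
      · by_cases hc2 : c2 = '0'
        · subst hc1; subst hc2
          have hr : rest.length ≤ n := by simp at hn; omega
          simp [List.takeWhile, ih rest hr]
          omega
        · have hb : (c2 == '0') = false := by simp [hc2]
          simp [List.take, List.takeWhile, hc1, hb, hc2]
      · have hb : (c1 == '0') = false := by simp [hc1]
        simp [List.take, List.takeWhile, hb, hc1]

theorem floordiv_natCast (a : Nat) :
    PySem.Int.floordiv (a : Int) 2 = ((a / 2 : Nat) : Int) := by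
  simp only [PySem.Int.floordiv, Int.fdiv_eq_ediv]
  omega

-- ===== VERDICT (by name: the statement is the Claim_ definition above) =====
theorem count_leading_zero_bytes_py_spec : Claim_equal_count_leading_zero_bytes_py := by
  intro s _
  unfold Spec_count_leading_zero_bytes_py count_leading_zero_bytes_py count_leading_zero_bytes_py_alt
  have hsplit := List.takeWhile_append_dropWhile (p := fun c => c == '0') (l := s.toList)
  have hlen : s.toList.length
      = (s.toList.takeWhile (fun c => c == '0')).length
        + (s.toList.dropWhile (fun c => c == '0')).length := by
    conv_lhs => rw [← hsplit]
    exact List.length_append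
  rw [countLoopA_eq_takeWhile s.toList.length s.toList le_rfl]
  have hcast : ((s.toList.length : Int) - ((s.toList.dropWhile (fun c => c == '0')).length : Int))
      = ((s.toList.takeWhile (fun c => c == '0')).length : Int) := by
    omega
  rw [hcast, floordiv_natCast]
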